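-- pv_equiv track=rewrite | github.com/miliar/Code_Jam_Webscraper | solutions_python/Problem_201/2792.py | find_isolated_stall
-- ===== SOURCE A (Python) =====
-- from itertools import groupby, takewhile
-- from typing import List
--
-- def find_isolated_stall(stalls: List[int]):
--     chosen = -1, 3  # idx, min_length
--     i = 0
--     while i < len(stalls):
--         if stalls[i] == 0:
--             unoccupied_stalls = list(takewhile(lambda x: x == 0, stalls[i:]))
--             if len(unoccupied_stalls) >= chosen[1]:
--                 middle_stall = int(((len(unoccupied_stalls) - 1) / 2))
--                 chosen = (i + middle_stall), len(unoccupied_stalls)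
--             i += len(unoccupied_stalls)
--         i += 1
--     return chosen
-- ===== SOURCE B (Python) =====
-- from typing import List
--
-- def find_isolated_stall(stalls: List[int]):
--     best_i, best_len = -1, 3
--     run_start = None  # start index of current zero-run, or None
--     for j, s in enumerate(stalls):
--         if s == 0:
--             if run_start is None:
--                 run_start = j
--         elif run_start is not None:
--             length = j - run_start
--             if length >= best_len:
--                 best_i, best_len = run_start + (length - 1) // 2, length
--             run_start = None
--     if run_start is not None:
--         length = len(stalls) - run_start
--         if length >= best_len:
--             best_i, best_len = run_start + (length - 1) // 2, length
--     return best_i, best_len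
-- ===== Notes on version B (the rewrite author's own statement) =====
-- stated objective: faster
-- what changed: Replaced A's while-loop that slices stalls[i:] and re-scans each zero-run with takewhile (O(n^2) from the slice copies) by a single linear state-machine pass over enumerate(stalls) that tracks the start of the current zero-run and closes it at the first nonzero or at end of list, with the same >= tie-break (last maximal run wins).
import Mathlib
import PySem

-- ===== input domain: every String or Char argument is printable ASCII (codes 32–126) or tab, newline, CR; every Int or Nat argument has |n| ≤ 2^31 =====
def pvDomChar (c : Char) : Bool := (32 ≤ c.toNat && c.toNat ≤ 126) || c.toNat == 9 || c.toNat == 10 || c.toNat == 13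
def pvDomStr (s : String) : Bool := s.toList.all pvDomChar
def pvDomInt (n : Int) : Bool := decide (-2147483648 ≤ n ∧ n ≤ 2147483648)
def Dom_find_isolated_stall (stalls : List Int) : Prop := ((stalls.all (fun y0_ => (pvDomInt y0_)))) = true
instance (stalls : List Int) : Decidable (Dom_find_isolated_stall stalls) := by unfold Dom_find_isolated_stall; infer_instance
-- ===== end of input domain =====

-- B replaces A's O(n^2) slice-and-takewhile rescans by one linear state-machine pass (objective: faster).
-- Python returns a 2-tuple (idx, len); both ports render it as the 2-element list [idx, len].

-- ===== PORT A =====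
-- while-loop of A: i advances by 1, or by len(run)+1 after a zero-run; chosen = (idx, min_length).
-- 'int((len-1)/2)' is exact floor for len ≥ 1, ported as Nat division.
def aLoop (stalls : List Int) (i : Nat) (chosen : Int × Int) : Int × Int :=
  if h : i < stalls.length then
    if stalls[i] = 0 then
      let run := (stalls.drop i).takeWhile (fun x => x == 0)
      let chosen' := if (run.length : Int) ≥ chosen.2 then
          ((i : Int) + (((run.length - 1) / 2 : Nat) : Int), (run.length : Int))
        else chosen
      aLoop stalls (i + run.length + 1) chosen'
    else aLoop stalls (i + 1) chosen
  else chosen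
termination_by stalls.length - i
decreasing_by all_goals omega

def find_isolated_stall (stalls : List Int) : List Int :=
  let c := aLoop stalls 0 (-1, 3)
  [c.1, c.2]

-- ===== PORT B =====
-- one step of the for-loop body of Source B; state = (best_i, best_len, run_start)
def bStep (st : Int × Int × Option Int) (p : Int × Int) : Int × Int × Option Int :=
  match st with
  | (bI, bL, runStart) =>
    if p.2 = 0 then
      match runStart with
      | none => (bI, bL, some p.1)
      | some _ => st
    else
      match runStart with
      | some s =>
        let length := p.1 - s
        if length ≥ bL then (s + PySem.Int.floordiv (length - 1) 2, length, none)
        else (bI, bL, none)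
      | none => st

-- the trailing 'if run_start is not None:' block after the loop
def bFlush (n : Int) (st : Int × Int × Option Int) : Int × Int :=
  match st with
  | (bI, bL, none) => (bI, bL)
  | (bI, bL, some s) =>
    let length := n - s
    if length ≥ bL then (s + PySem.Int.floordiv (length - 1) 2, length) else (bI, bL)

def find_isolated_stall_alt (stalls : List Int) : List Int :=
  let c := bFlush (stalls.length : Int) ((PySem.List.enumerate stalls 0).foldl bStep (-1, 3, none))
  [c.1, c.2]

-- ===== PRECONDITION & SPEC =====
def Spec_find_isolated_stall (stalls : List Int) (out : List Int) : Prop := out = find_isolated_stall_alt stalls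
instance (stalls : List Int) (out : List Int) : Decidable (Spec_find_isolated_stall stalls out) := by unfold Spec_find_isolated_stall; infer_instance

-- ===== CLAIM (what is proved, stated in full; the proofs are below) =====
def Claim_equal_find_isolated_stall : Prop := ∀ (stalls : List Int), Dom_find_isolated_stall stalls → Spec_find_isolated_stall stalls (find_isolated_stall stalls)

-- ===== LEMMAS AND PROOFS =====

-- B's fold over enumerate, rewritten as structural recursion carrying the absolute index
def bGo (j : Int) (st : Int × Int × Option Int) : List Int → Int × Int × Option Int
  | [] => st
  | x :: xs => bGo (j + 1) (bStep st (j, x)) xs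

theorem foldl_enumerate_eq_bGo (l : List Int) : ∀ (j : Int) (st : Int × Int × Option Int),
    (PySem.List.enumerate l j).foldl bStep st = bGo j st l := by
  induction l with
  | nil => intro j st; simp [PySem.List.enumerate_nil, bGo]
  | cons x xs ih => intro j st; simp [PySem.List.enumerate_cons, bGo, ih]

-- running through zeros with an open run leaves the state unchanged (only j advances)
theorem bGo_zeros (zs : List Int) : ∀ (rest : List Int) (j bI bL s : Int),
    (∀ x ∈ zs, x = 0) →
    bGo j (bI, bL, some s) (zs ++ rest) = bGo (j + zs.length) (bI, bL, some s) rest := by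
  induction zs with
  | nil => intro rest j bI bL s _; simp
  | cons z zt ih =>
    intro rest j bI bL s hz
    have hz0 : z = 0 := hz z (by simp)
    have hrec := ih rest (j + 1) bI bL s (fun x hx => hz x (by simp [hx]))
    simp only [List.cons_append, bGo, bStep, hz0]
    norm_num
    rw [hrec]
    congr 1
    omega

theorem floordiv_pred_two (L : Nat) (h : 1 ≤ L) :
    PySem.Int.floordiv ((L : Int) - 1) 2 = (((L - 1) / 2 : Nat) : Int) := by
  have h1 : (L : Int) - 1 = ((L - 1 : Nat) : Int) := by omega
  rw [h1]
  exact_mod_cast PySem.Int.floordiv_natCast (L - 1) 2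

theorem aLoop_eq_bGo (stalls : List Int) : ∀ (n i : Nat) (bI bL : Int),
    stalls.length - i ≤ n →
    aLoop stalls i (bI, bL) =
      bFlush (stalls.length : Int) (bGo (i : Int) (bI, bL, none) (stalls.drop i)) := by
  intro n
  induction n with
  | zero =>
    intro i bI bL hn
    have hge : stalls.length ≤ i := by omega
    rw [aLoop, dif_neg (by omega)]
    rw [List.drop_eq_nil_of_le hge]
    simp [bGo, bFlush]
  | succ n ih =>
    intro i bI bL hn
    by_cases h : i < stalls.length
    · have hdrop : stalls.drop i = stalls[i] :: stalls.drop (i + 1) :=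
        List.drop_eq_getElem_cons h
      by_cases h0 : stalls[i] = 0
      · -- zero-run case
        rw [aLoop, dif_pos h, if_pos h0]
        dsimp only
        set L : Nat := ((stalls.drop i).takeWhile (fun x => x == 0)).length with hL
        have hrun : (stalls.drop i).takeWhile (fun x => x == 0) = stalls[i] :: (stalls.drop (i + 1)).takeWhile (fun x => x == 0) := by
          rw [hdrop, List.takeWhile_cons_of_pos (by simp [h0])]
        set runT : List Int := (stalls.drop (i + 1)).takeWhile (fun x => x == 0) with hrunT
        have hLrun : L = runT.length + 1 := by rw [hL, hrun]; simp
        have hL1 : 1 ≤ L := by omega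
        have hLle : L ≤ stalls.length - i := by
          have h1 := (List.takeWhile_sublist (fun x => x == 0) (l := stalls.drop i)).length_le
          rw [← hL, List.length_drop] at h1
          omega
        have hsplit : stalls.drop (i + 1) = runT ++ (stalls.drop i).dropWhile (fun x => x == 0) := by
          have h2 := List.takeWhile_append_dropWhile (p := fun x => x == 0) (l := stalls.drop i)
          rw [hrun] at h2
          have h3 : stalls[i] :: (runT ++ (stalls.drop i).dropWhile (fun x => x == 0)) =
              stalls[i] :: stalls.drop (i + 1) := by rw [← List.cons_append, h2, hdrop]
          exact (List.cons.inj h3).2.symm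
        have hrest : stalls.drop (i + L) = (stalls.drop i).dropWhile (fun x => x == 0) := by
          have h1 : stalls.drop (i + L) = (stalls.drop i).drop L := by rw [List.drop_drop]
          rw [h1]
          conv_lhs => rw [← List.takeWhile_append_dropWhile (p := fun x => x == 0) (l := stalls.drop i)]
          exact List.drop_left' hL.symm
        have hzeros : ∀ x ∈ runT, x = 0 := by
          intro x hx
          have := List.mem_takeWhile_imp hx
          simpa using this
        -- unfold B: first zero, then the rest of the run, reaching index i + L
        rw [hdrop]
        have hstep0 : bStep (bI, bL, none) ((i : Int), stalls[i]) = (bI, bL, some (i : Int)) := by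
          simp [bStep, h0]
        simp only [bGo, hstep0]
        rw [hsplit, bGo_zeros runT _ _ bI bL _ hzeros]
        rw [show ((i : Int) + 1 + (runT.length : Int)) = ((i + L : Nat) : Int) by push_cast; omega]
        rw [← hrest]
        -- close the run: either the list ends, or a nonzero element follows
        rcases hr : stalls.drop (i + L) with _ | ⟨y, restT⟩
        · -- run reaches the end of the list
          have hlen : i + L = stalls.length := by
            have := List.drop_eq_nil_iff.mp hr
            omega
          have hc1 : (stalls.length : Int) - (i : Int) = (L : Int) := by omega
          rw [aLoop, dif_neg (by omega)]
          simp only [bGo, bFlush, hc1, floordiv_pred_two L hL1]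
        · -- a nonzero element y follows the run
          have hynz : ¬ (y = 0) := by
            have hne : (stalls.drop i).dropWhile (fun x => x == 0) ≠ [] := by
              rw [← hrest, hr]; simp
            have hhead := List.head_dropWhile_not (fun x => x == 0) (l := stalls.drop i) hne
            have h4 : (stalls.drop i).dropWhile (fun x => x == 0) = y :: restT :=
              hrest.symm.trans hr
            have hy : ((stalls.drop i).dropWhile (fun x => x == 0)).head hne = y := by
              simp [h4]
            rw [hy] at hhead
            simpa using hhead
          have hdropL1 : stalls.drop (i + L + 1) = restT := by
            have h1 : stalls.drop (i + L + 1) = (stalls.drop (i + L)).drop 1 := by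
              rw [List.drop_drop]
            rw [h1, hr]
            simp
          have hcast : ((i + L : Nat) : Int) - (i : Int) = (L : Int) := by push_cast; ring
          have hstep2 : bStep (bI, bL, some (i : Int)) (((i + L : Nat) : Int), y) =
              (if (L : Int) ≥ bL then
                ((i : Int) + PySem.Int.floordiv ((L : Int) - 1) 2, (L : Int), none)
               else (bI, bL, none)) := by
            simp only [bStep, if_neg hynz, hcast]
          simp only [bGo, hstep2]
          rw [floordiv_pred_two L hL1]
          have hrec := fun a b => ih (i + L + 1) a b (by omega)
          rw [hdropL1] at hrec
          rw [show ((i + L : Nat) : Int) + 1 = ((i + L + 1 : Nat) : Int) by push_cast; ring]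
          by_cases hcnd : (L : Int) ≥ bL
          · rw [if_pos hcnd, if_pos hcnd, hrec]
          · rw [if_neg hcnd, if_neg hcnd, hrec]
      · -- nonzero head: both sides advance by one
        rw [aLoop, dif_pos h, if_neg h0]
        rw [hdrop]
        have hstep : bStep (bI, bL, none) ((i : Int), stalls[i]) = (bI, bL, none) := by
          simp [bStep, h0]
        simp only [bGo, hstep]
        have := ih (i + 1) bI bL (by omega)
        rw [show ((i : Int) + 1) = ((i + 1 : Nat) : Int) by push_cast; ring]
        exact this
    · have hge : stalls.length ≤ i := by omega
      rw [aLoop, dif_neg (by omega)]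
      rw [List.drop_eq_nil_of_le hge]
      simp [bGo, bFlush]

theorem find_isolated_stall_spec : Claim_equal_find_isolated_stall := by
  intro stalls _
  unfold Spec_find_isolated_stall find_isolated_stall find_isolated_stall_alt
  rw [foldl_enumerate_eq_bGo]
  have h := aLoop_eq_bGo stalls stalls.length 0 (-1) 3 (by omega)
  simp only [List.drop_zero] at h
  rw [h]
  norm_num
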